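-- pv_equiv track=rewrite | github.com/harshraj211/wraith-scanner | scanner/utils/deduplication.py | aggregate_by_type
-- ===== SOURCE A (Python) =====
-- def aggregate_by_type(findings):
--     """Group findings by vulnerability type for summary."""
--     aggregated = {}
--
--     for finding in findings:
--         vuln_type = finding.get('type', 'unknown')
--
--         if vuln_type not in aggregated:
--             aggregated[vuln_type] = []
--
--         aggregated[vuln_type].append(finding)
--
--     return aggregated
-- ===== SOURCE B (Python) =====
-- def aggregate_by_type(findings):
--     """Group findings by vulnerability type for summary.
--
--     Two-pass strategy: collect the distinct types in first-occurrence order,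
--     then build each group by filtering the whole list per type.
--     """
--     keys = list(dict.fromkeys(f.get('type', 'unknown') for f in findings))
--     return {k: [f for f in findings if f.get('type', 'unknown') == k] for k in keys}
-- ===== Notes on version B (the rewrite author's own statement) =====
-- stated objective: alternative
-- what changed: Replaced the single-pass hash-bucketing loop (create-bucket-if-missing, append) by a two-pass dedup-keys-then-filter-per-key strategy (list(dict.fromkeys(...)) + a dict comprehension of filters).
import Mathlib
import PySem

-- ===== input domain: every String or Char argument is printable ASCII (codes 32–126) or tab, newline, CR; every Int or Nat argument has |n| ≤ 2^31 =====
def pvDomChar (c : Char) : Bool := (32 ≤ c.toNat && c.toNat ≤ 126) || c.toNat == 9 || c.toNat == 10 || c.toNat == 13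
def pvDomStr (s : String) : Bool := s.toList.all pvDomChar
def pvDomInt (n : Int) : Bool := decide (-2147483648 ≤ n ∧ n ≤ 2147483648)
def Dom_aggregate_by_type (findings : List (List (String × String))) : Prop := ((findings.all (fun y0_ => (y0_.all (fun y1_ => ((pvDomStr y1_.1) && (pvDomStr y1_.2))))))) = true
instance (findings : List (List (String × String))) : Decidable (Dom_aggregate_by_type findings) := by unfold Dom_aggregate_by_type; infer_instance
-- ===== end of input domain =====

-- B replaces A's single-pass hash-bucketing by a two-pass dedup-keys-then-filter-per-key strategy (alternative decomposition, same results).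


-- shared by both ports: Python's finding.get('type', 'unknown')
def pvKey (finding : List (String × String)) : String :=
  PySem.Dict.getD (PySem.Dict.mk finding) "type" "unknown"

-- ===== PORT A =====
def aggregate_by_type (findings : List (List (String × String))) : List (String × List (List (String × String))) :=
  (findings.foldl (fun aggregated finding =>
    let vuln_type := pvKey finding
    let aggregated := if aggregated.contains vuln_type then aggregated
                      else aggregated.insert vuln_type []
    aggregated.modify vuln_type [] (fun v => v ++ [finding])) PySem.Dict.empty).items

-- ===== PORT B =====
def aggregate_by_type_alt (findings : List (List (String × String))) : List (String × List (List (String × String))) :=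
  let keys := PySem.List.dedup (findings.map pvKey)
  (keys.foldl (fun d k => d.insert k (findings.filter (fun f => pvKey f == k))) PySem.Dict.empty).items

-- ===== PRECONDITION & SPEC =====
def Spec_aggregate_by_type (findings : List (List (String × String))) (out : List (String × List (List (String × String)))) : Prop := out = aggregate_by_type_alt findings
instance (findings : List (List (String × String))) (out : List (String × List (List (String × String)))) : Decidable (Spec_aggregate_by_type findings out) := by unfold Spec_aggregate_by_type; infer_instance

-- ===== CLAIM (what is proved, stated in full; the proofs are below) =====
def Claim_equal_aggregate_by_type : Prop := ∀ (findings : List (List (String × String))), Dom_aggregate_by_type findings → Spec_aggregate_by_type findings (aggregate_by_type findings)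

-- ===== LEMMAS AND PROOFS =====

-- A's loop body (create-bucket-if-missing, then append) is one modify with default [].
theorem pv_stepA_eq_modify (d : PySem.Dict String (List (List (String × String)))) (f : List (String × String)) :
    (let vuln_type := pvKey f
     let aggregated := if d.contains vuln_type then d else d.insert vuln_type []
     aggregated.modify vuln_type [] (fun v => v ++ [f]))
    = d.modify (pvKey f) [] (fun v => v ++ [f]) := by
  by_cases hc : d.contains (pvKey f) = true
  · simp [hc]
  · simp only [Bool.not_eq_true] at hc
    simp [hc, PySem.Dict.modify, PySem.Dict.insert_insert_self,
      PySem.Dict.getD_insert_self, PySem.Dict.getD_of_not_contains d [] hc]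

theorem pv_main (findings : List (List (String × String))) :
    aggregate_by_type findings = aggregate_by_type_alt findings := by
  unfold aggregate_by_type aggregate_by_type_alt
  rw [PySem.List.foldl_congr_mem findings _ (fun d f => d.modify (pvKey f) [] (fun v => v ++ [f])) PySem.Dict.empty (fun d f _ => pv_stepA_eq_modify d f)]
  -- name the accumulated dict
  set D := findings.foldl (fun d f => d.modify (pvKey f) [] (fun v => v ++ [f])) PySem.Dict.empty with hD
  have hkeys : D.keys = PySem.List.dedup (findings.map pvKey) := by
    rw [hD, PySem.Dict.keys_foldl_modify_key findings pvKey [] (fun _ f v => v ++ [f]),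
      PySem.List.dedup_eq_ofList]
    simp [PySem.Dict.keys_empty, PySem.Set.update_nil_left]
  have hnd : D.keys.Nodup := by
    rw [hD]
    exact PySem.Dict.nodup_keys_foldl_modify_key findings pvKey [] (fun _ f v => v ++ [f]) _ (by simp [PySem.Dict.keys_empty])
  have hgetD : ∀ k, D.getD k [] = findings.filter (fun f => pvKey f == k) := by
    intro k
    have := PySem.Dict.getD_foldl_modify_append (findings.map (fun f => (pvKey f, f))) (PySem.Dict.empty) k
    rw [List.foldl_map] at this
    simp only [hD, this, PySem.Dict.getD_empty, List.nil_append, List.filter_map]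
    simp [Function.comp_def]
  rw [PySem.Dict.items_eq_map_keys D hnd [], hkeys]
  rw [PySem.Dict.items_foldl_insert_fresh _ (fun k => k) _ PySem.Dict.empty
    (fun a _ => by simp [PySem.Dict.contains_empty]) (by simp)]
  simp only [PySem.Dict.empty, List.nil_append]
  exact List.map_congr_left (fun k _ => by rw [hgetD k])

-- ===== VERDICT (by name: the statement is the Claim_ definition above) =====
theorem aggregate_by_type_spec : Claim_equal_aggregate_by_type := by
  intro findings _
  unfold Spec_aggregate_by_type
  exact pv_main findings
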